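-- pv_equiv track=rewrite | github.com/JohnEaganFS/CSCI-154-Simulation-Projects | Blackjack/customGame.py | calcHandValues
-- ===== SOURCE A (Python) =====
-- def calcHandValues(cards):
--     haveAces = 1 in cards  # check if aces in hand
--     handValues = []  # initially no hands, can only add a hand if it won't bust
--     if haveAces:  # Aces Case
--         numAces = cards.count(1)
--         possibleAces = [(x,y) for x in [0,1,2,3,4] for y in [0,1,2,3,4] if x + y == numAces]  # make every (x,y) pair of the num of aces counting as 1 or 11 (x -> 1, y -> 11)
--         temp = sum(cards) - numAces                                                           # Ex: I have two aces. (0,2) or (1,1) or (2,0) => two 11's or one 1, one 11 or two 1's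
--         possibleHands = [temp + (x * 1) + (y * 11) for (x,y) in possibleAces]  # add the rest of the cards with those possible ace values
--         for i in possibleHands:
--             if i <= 21:
--                 handValues.append(i)
--     else:  # No aces (hard hand)
--         temp = sum(cards)  # simply sum the card values
--         if temp <= 21:
--             handValues.append(temp)
--     return handValues
-- ===== SOURCE B (Python) =====
-- def calcHandValues(cards):
--     # DP over the hand: carry the set of achievable totals (each ace worth 1 or 11),
--     # then keep the non-bust ones in descending order.
--     totals = {0}
--     for c in cards:
--         if c == 1:
--             totals = {t + 1 for t in totals} | {t + 11 for t in totals}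
--         else:
--             totals = {t + c for t in totals}
--     return sorted((t for t in totals if t <= 21), reverse=True)
-- ===== Notes on version B (the rewrite author's own statement) =====
-- stated objective: alternative
-- what changed: Replaced A's 5x5 (x,y) ace-pair enumeration plus append loop by a fold over the hand that carries the set of achievable totals (each ace adds 1 or 11) and a final descending sort of the non-bust totals.
-- intended difference: On hands with five or more aces whose plain card sum does not bust, A's hard-coded 0..4 cap per ace group drops the low totals (on a hand of five aces A yields only the total 15, omitting the valid 5), while B yields every non-bust total (15 and 5 there), which is the intended set of valid hand values. — e.g. on calcHandValues([1, 1, 1, 1, 1]): A returns [15], B returns [15, 5]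
import Mathlib
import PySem

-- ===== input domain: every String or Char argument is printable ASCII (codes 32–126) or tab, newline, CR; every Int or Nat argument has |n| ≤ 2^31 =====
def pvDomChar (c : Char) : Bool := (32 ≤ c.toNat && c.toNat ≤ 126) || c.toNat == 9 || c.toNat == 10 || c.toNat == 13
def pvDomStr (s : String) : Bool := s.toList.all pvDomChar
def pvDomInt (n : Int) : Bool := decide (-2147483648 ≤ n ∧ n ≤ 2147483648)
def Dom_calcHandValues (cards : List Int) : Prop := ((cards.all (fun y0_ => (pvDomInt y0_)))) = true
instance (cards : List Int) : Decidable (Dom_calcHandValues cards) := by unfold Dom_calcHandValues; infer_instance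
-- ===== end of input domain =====

-- B replaces A's ace-pair enumeration by a DP over the hand: it folds the cards carrying the set of
-- achievable totals (each ace worth 1 or 11) and finally sorts the non-bust totals descending (alternative).

-- ===== PORT A =====
def calcHandValues (cards : List Int) : List Int :=
  let haveAces := cards.contains 1
  let handValues : List Int := []
  if haveAces then
    let numAces : Int := PySem.List.count cards 1
    let possibleAces := (([0,1,2,3,4] : List Int)).flatMap (fun x =>
      ((([0,1,2,3,4] : List Int)).filter (fun y => x + y == numAces)).map (fun y => (x, y)))
    let temp := cards.sum - numAces
    let possibleHands := possibleAces.map (fun p => temp + p.1 * 1 + p.2 * 11)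
    possibleHands.foldl (fun acc i => if i ≤ 21 then acc ++ [i] else acc) handValues
  else
    let temp := cards.sum
    if temp ≤ 21 then handValues ++ [temp] else handValues

-- ===== PORT B =====
-- one loop step: totals = {t+1 for t in totals} | {t+11 for t in totals}  if c == 1  else  {t+c for t in totals}
def chvStep (totals : PySem.Set Int) (c : Int) : PySem.Set Int :=
  if c == 1 then
    PySem.Set.union (PySem.Set.ofList (totals.map (· + 1))) (totals.map (· + 11))
  else
    PySem.Set.ofList (totals.map (· + c))

def calcHandValues_alt (cards : List Int) : List Int :=
  let totals := cards.foldl chvStep (PySem.Set.ofList [0])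
  PySem.List.sorted (totals.filter (fun t => decide (t ≤ 21))) (fun x => x) true

-- ===== PRECONDITION & SPEC =====
-- On hands with at least five aces whose plain card sum does not bust, A's hard-coded 0..4 cap on each
-- ace group drops the low totals (on a hand of five aces A yields only the total 15, omitting the
-- valid 5), while B yields every non-bust total, the intended set of valid hand values.
def D_calcHandValues (cards : List Int) : Prop := 5 ≤ List.count 1 cards ∧ cards.sum ≤ 21
instance (cards : List Int) : Decidable (D_calcHandValues cards) := by unfold D_calcHandValues; infer_instance
def Spec_calcHandValues (cards : List Int) (out : List Int) : Prop := ¬ D_calcHandValues cards → out = calcHandValues_alt cards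
instance (cards : List Int) (out : List Int) : Decidable (Spec_calcHandValues cards out) := by unfold Spec_calcHandValues; infer_instance

def pvDiffWitness_calcHandValues : List Int := [1, 1, 1, 1, 1]
def pvDiffWitnessOut_calcHandValues : (List Int) × (List Int) := ([15], [15, 5])

-- ===== CLAIM (what is proved, stated in full; the proofs are below) =====
def Claim_unchanged_calcHandValues : Prop := ∀ (cards : List Int), Dom_calcHandValues cards → Spec_calcHandValues cards (calcHandValues cards)
def Claim_changed_calcHandValues : Prop := Dom_calcHandValues (pvDiffWitness_calcHandValues) ∧ D_calcHandValues (pvDiffWitness_calcHandValues) ∧ calcHandValues (pvDiffWitness_calcHandValues) = pvDiffWitnessOut_calcHandValues.1 ∧ calcHandValues_alt (pvDiffWitness_calcHandValues) = pvDiffWitnessOut_calcHandValues.2 ∧ pvDiffWitnessOut_calcHandValues.1 ≠ pvDiffWitnessOut_calcHandValues.2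
def Claim_exact_calcHandValues : Prop := ∀ (cards : List Int), Dom_calcHandValues cards → D_calcHandValues cards → calcHandValues cards ≠ calcHandValues_alt cards

-- ===== LEMMAS AND PROOFS =====

-- the shape of B's totals set after processing cards summing to s with n aces
def chvL (s n : Int) : List Int := (PySem.List.pyRange 0 (n+1) 1).map (fun y => s + 10 * y)

theorem chvL_nodup (s n : Int) : (chvL s n).Nodup := by
  refine List.Nodup.map ?_ (PySem.List.nodup_pyRange_one 0 (n+1))
  intro a b h
  have h' : s + 10 * a = s + 10 * b := h
  omega

theorem mem_chvL (s n t : Int) : t ∈ chvL s n ↔ ∃ y : Int, 0 ≤ y ∧ y ≤ n ∧ t = s + 10 * y := by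
  simp only [chvL, List.mem_map, PySem.List.mem_pyRange_one]
  constructor
  · rintro ⟨y, ⟨h0, h1⟩, rfl⟩; exact ⟨y, h0, by omega, rfl⟩
  · rintro ⟨y, h0, h1, rfl⟩; exact ⟨y, ⟨h0, by omega⟩, rfl⟩

theorem chvStep_ace (s n : Int) (hn : 0 ≤ n) :
    chvStep (chvL s n) 1 = chvL (s + 1) (n + 1) := by
  have h1 : (chvL s n).map (· + 1) = chvL (s + 1) n := by
    simp only [chvL, List.map_map]
    apply List.map_congr_left; intro y _; simp only [Function.comp]; ring
  have h11 : (chvL s n).map (· + 11)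
      = (PySem.List.pyRange 0 (n+1) 1).map (fun y => s + 1 + 10 * (y + 1)) := by
    simp only [chvL, List.map_map]
    apply List.map_congr_left; intro y _; simp only [Function.comp]; ring
  simp only [chvStep, beq_self_eq_true, if_true, h1,
    PySem.Set.ofList_eq_self_of_nodup _ (chvL_nodup (s+1) n), PySem.Set.union,
    PySem.Set.update_eq_append_filter, h11]
  have hnodup : ((PySem.List.pyRange 0 (n+1) 1).map (fun y => s + 1 + 10 * (y + 1))).Nodup := by
    refine List.Nodup.map ?_ (PySem.List.nodup_pyRange_one 0 (n+1))
    intro a b h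
    have h' : s + 1 + 10 * (a + 1) = s + 1 + 10 * (b + 1) := h
    omega
  rw [PySem.Set.ofList_eq_self_of_nodup _ hnodup, List.filter_map]
  have hcongr : ∀ y ∈ PySem.List.pyRange 0 (n+1) 1,
      ((fun t => !(PySem.Set.contains (chvL (s+1) n) t)) ∘ (fun y => s + 1 + 10 * (y + 1))) y
        = (y == n) := by
    intro y hy
    rw [PySem.List.mem_pyRange_one] at hy
    have key : PySem.Set.contains (chvL (s+1) n) (s + 1 + 10 * (y + 1)) = true ↔ y < n := by
      rw [PySem.Set.contains_iff, mem_chvL]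
      constructor
      · rintro ⟨z, hz0, hz1, hz⟩; omega
      · intro h; exact ⟨y + 1, by omega, by omega, by ring⟩
    simp only [Function.comp]
    by_cases hyn : y = n
    · have hfalse : PySem.Set.contains (chvL (s+1) n) (s + 1 + 10 * (y + 1)) = false :=
        Bool.eq_false_iff.mpr (fun h => absurd (key.mp h) (by omega))
      rw [hfalse]; simp [hyn]
    · have htrue : PySem.Set.contains (chvL (s+1) n) (s + 1 + 10 * (y + 1)) = true :=
        key.mpr (by omega)
      rw [htrue]; simp [hyn]
  rw [List.filter_congr hcongr]
  have hfil : (PySem.List.pyRange 0 (n+1) 1).filter (fun y => y == n) = [n] := by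
    rw [PySem.List.pyRange_one_succ_right (by omega : (0:Int) ≤ n), List.filter_append]
    have h0 : (PySem.List.pyRange 0 n 1).filter (fun y => y == n) = [] := by
      apply List.filter_eq_nil_iff.mpr
      intro y hy
      rw [PySem.List.mem_pyRange_one] at hy
      simp only [beq_iff_eq]
      omega
    rw [h0]
    simp
  rw [hfil]
  show _ = chvL (s+1) (n+1)
  simp only [chvL]
  rw [show PySem.List.pyRange 0 (n+1+1) 1 = PySem.List.pyRange 0 (n+1) 1 ++ [n+1] from
    PySem.List.pyRange_one_succ_right (by omega : (0:Int) ≤ n+1), List.map_append]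
  simp only [List.map_cons, List.map_nil]

theorem chvStep_non_ace (s n c : Int) (hc : c ≠ 1) :
    chvStep (chvL s n) c = chvL (s + c) n := by
  have h1 : (chvL s n).map (· + c) = chvL (s + c) n := by
    simp only [chvL, List.map_map]
    apply List.map_congr_left; intro y _; simp only [Function.comp]; ring
  simp only [chvStep, beq_iff_eq, hc, if_false, h1]
  exact PySem.Set.ofList_eq_self_of_nodup _ (chvL_nodup _ _)

theorem chv_fold (cards : List Int) : ∀ (s n : Int), 0 ≤ n →
    cards.foldl chvStep (chvL s n) = chvL (s + cards.sum) (n + (List.count 1 cards : Int)) := by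
  induction cards with
  | nil => intro s n _; simp
  | cons c cs ih =>
    intro s n hn
    by_cases hc : c = 1
    · subst hc
      rw [List.foldl_cons, chvStep_ace s n hn, ih (s+1) (n+1) (by omega),
        List.sum_cons, List.count_cons_self]
      congr 1 <;> push_cast <;> ring
    · have hcnt : List.count 1 (c :: cs) = List.count 1 cs := by
        simp [hc]
      rw [List.foldl_cons, chvStep_non_ace s n c hc, ih (s+c) n hn, List.sum_cons, hcnt]
      congr 1; ring

-- B computes the reversed (descending) non-bust value list
theorem alt_eq (cards : List Int) :
    calcHandValues_alt cards
      = ((chvL cards.sum (List.count 1 cards : Int)).filter (fun t => decide (t ≤ 21))).reverse := by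
  unfold calcHandValues_alt
  have h0 : PySem.Set.ofList ([0] : List Int) = chvL 0 0 := by decide
  rw [h0, chv_fold cards 0 0 le_rfl, zero_add, zero_add]
  apply PySem.List.sorted_rev_eq_of_perm_of_pairwise_gt
  · exact List.reverse_perm _
  · rw [List.pairwise_reverse]
    refine List.Pairwise.filter _ ?_
    refine List.Pairwise.map _ ?_ (PySem.List.pairwise_lt_pyRange_one 0 _)
    intro a b h; omega

theorem mem_05 (x : Int) (hx : x ∈ ([0,1,2,3,4] : List Int)) : 0 ≤ x ∧ x ≤ 4 := by
  fin_cases hx <;> norm_num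

-- A's value list equals B's (pre-reversal) for 1..4 aces, with a symbolic card sum s
theorem hands_eq (s n : Int) (h1 : 1 ≤ n) (h4 : n ≤ 4) :
    ((([0,1,2,3,4] : List Int)).flatMap (fun x =>
      ((([0,1,2,3,4] : List Int)).filter (fun y => x + y == n)).map (fun y => (x, y)))).map
        (fun p => s - n + p.1 * 1 + p.2 * 11)
      = (chvL s n).reverse := by
  interval_cases n <;>
    norm_num [List.flatMap, chvL, PySem.List.pyRange_one, List.range_succ,
      show Int.toNat 2 = 2 from rfl, show Int.toNat 3 = 3 from rfl,
      show Int.toNat 4 = 4 from rfl, show Int.toNat 5 = 5 from rfl] <;>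
    ring_nf <;> simp

-- every hand value A enumerates is the card sum plus 10 per ace counted as 11
theorem mem_hands (s : Int) (n : Int) (i : Int)
    (hi : i ∈ ((([0,1,2,3,4] : List Int)).flatMap (fun x =>
      ((([0,1,2,3,4] : List Int)).filter (fun y => x + y == n)).map (fun y => (x, y)))).map
        (fun p => s - n + p.1 * 1 + p.2 * 11)) :
    ∃ y : Int, 0 ≤ y ∧ y ≤ 4 ∧ n - 4 ≤ y ∧ i = s + 10 * y := by
  obtain ⟨p, hp, hval⟩ := List.mem_map.mp hi
  obtain ⟨x, hx, hp2⟩ := List.mem_flatMap.mp hp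
  obtain ⟨y, hy, rfl⟩ := List.mem_map.mp hp2
  obtain ⟨hymem, hxy⟩ := List.mem_filter.mp hy
  have hxy' : x + y = n := by simpa using hxy
  obtain ⟨hx0, hx4⟩ := mem_05 x hx
  obtain ⟨hy0, hy4⟩ := mem_05 y hymem
  simp only at hval
  exact ⟨y, hy0, hy4, by omega, by omega⟩

theorem hands_filter_nil (s n : Int) (hs : 21 < s) :
    (((([0,1,2,3,4] : List Int)).flatMap (fun x =>
      ((([0,1,2,3,4] : List Int)).filter (fun y => x + y == n)).map (fun y => (x, y)))).map
        (fun p => s - n + p.1 * 1 + p.2 * 11)).filter (fun i => decide (i ≤ 21)) = [] := by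
  apply List.filter_eq_nil_iff.mpr
  intro i hi
  obtain ⟨y, hy0, _, _, hval⟩ := mem_hands s n i hi
  simp only [decide_eq_true_eq]
  omega

theorem chvL_filter_nil (s n : Int) (hs : 21 < s) :
    (chvL s n).filter (fun t => decide (t ≤ 21)) = [] := by
  apply List.filter_eq_nil_iff.mpr
  intro t ht
  obtain ⟨y, hy0, _, rfl⟩ := (mem_chvL s n t).mp ht
  simp only [decide_eq_true_eq]
  omega

-- ===== VERDICT (by name: the statements are the Claim_ definitions above) =====
theorem calcHandValues_spec : Claim_unchanged_calcHandValues := by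
  intro cards _ hnd
  show calcHandValues cards = calcHandValues_alt cards
  rw [alt_eq]
  unfold calcHandValues
  by_cases hmem : (1 : Int) ∈ cards
  · have hc : cards.contains 1 = true := by simpa using hmem
    have hn : 1 ≤ List.count 1 cards := List.one_le_count_iff.mpr hmem
    simp only [hc, if_true, PySem.List.count_eq]
    rw [PySem.List.foldl_append_ite_eq_filter (fun i => i ≤ 21), List.nil_append]
    by_cases h4 : List.count 1 cards ≤ 4
    · rw [hands_eq cards.sum (List.count 1 cards : Int) (by exact_mod_cast hn) (by exact_mod_cast h4),
        List.filter_reverse]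
    · have hs : 21 < cards.sum := by
        by_contra h
        exact hnd ⟨by omega, by omega⟩
      rw [hands_filter_nil _ _ hs, chvL_filter_nil _ _ hs]
      rfl
  · have hc : cards.contains 1 = false := by simpa using hmem
    have hn : List.count 1 cards = 0 := List.count_eq_zero.mpr hmem
    simp only [hc, Bool.false_eq_true, if_false, hn]
    have h1 : chvL cards.sum ((0 : Nat) : Int) = [cards.sum] := by
      simp [chvL, show PySem.List.pyRange (0:Int) 1 1 = [0] by decide]
    rw [Nat.cast_zero] at h1
    rw [Nat.cast_zero, h1]
    by_cases hs : cards.sum ≤ 21 <;> simp [hs]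

theorem calcHandValues_changed : Claim_changed_calcHandValues := by
  unfold Claim_changed_calcHandValues; decide

theorem calcHandValues_tight : Claim_exact_calcHandValues := by
  intro cards _ hD
  obtain ⟨hn, hs⟩ := hD
  have hmem : (1 : Int) ∈ cards := List.count_pos_iff.mp (by omega)
  have hc : cards.contains 1 = true := by simpa using hmem
  intro heq
  -- cards.sum is a value of B but not of A
  have hsB : cards.sum ∈ calcHandValues_alt cards := by
    rw [alt_eq, List.mem_reverse, List.mem_filter]
    refine ⟨?_, by simpa using hs⟩
    rw [mem_chvL]
    exact ⟨0, le_rfl, by exact_mod_cast Nat.zero_le _, by ring⟩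
  have hsA : cards.sum ∉ calcHandValues cards := by
    unfold calcHandValues
    simp only [hc, if_true, PySem.List.count_eq]
    rw [PySem.List.foldl_append_ite_eq_filter (fun i => i ≤ 21), List.nil_append]
    intro hmem'
    obtain ⟨y, hy0, hy4, hylo, hval⟩ :=
      mem_hands cards.sum ((List.count 1 cards : Nat) : Int) cards.sum (List.mem_of_mem_filter hmem')
    have h5 : (5 : Int) ≤ ((List.count 1 cards : Nat) : Int) := by exact_mod_cast hn
    omega
  exact hsA (heq ▸ hsB)
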